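-- pv_equiv track=rewrite | github.com/yewentai/A-Generic-AI-based-Framework-For-IMU-based-Food-Intake-Gesture-Detection | components/datasets.py | segment_by_class
-- ===== SOURCE A (Python) =====
-- def segment_by_class(imu_data, label_seq, min_length):
--     """
--     Cut sequences into segments where label is constant.
--
--     Returns:
--         List of tuples: [(imu_segment, label), ...]
--     """
--     segments = []
--     current_label = label_seq[0]
--     start = 0
--
--     for i in range(1, len(label_seq)):
--         if label_seq[i] != current_label:
--             if i - start >= min_length:
--                 segments.append((imu_data[start:i], current_label))
--             start = i
--             current_label = label_seq[i]
--
--     # Add last segment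
--     if len(label_seq) - start >= min_length:
--         segments.append((imu_data[start:], current_label))
--
--     return segments
-- ===== SOURCE B (Python) =====
-- def segment_by_class(imu_data, label_seq, min_length):
--     """Two-pass: collect run-boundary cut points first, then slice and filter."""
--     n = len(label_seq)
--     cuts = [i for i in range(1, n) if label_seq[i] != label_seq[i - 1]]
--     segments = []
--     for s, e in zip([0] + cuts, cuts + [None]):
--         if (n if e is None else e) - s >= min_length:
--             segments.append((imu_data[s:e], label_seq[s]))
--     return segments
-- ===== Notes on version B (the rewrite author's own statement) =====
-- stated objective: idiomatic
-- what changed: Replaces A's single-pass label-change state machine (mutable current_label/start) with a two-pass groups-then-filter decomposition: first collect the run-boundary cut points with a comprehension, then zip consecutive boundaries and emit each sufficiently long run.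
import Mathlib
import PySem

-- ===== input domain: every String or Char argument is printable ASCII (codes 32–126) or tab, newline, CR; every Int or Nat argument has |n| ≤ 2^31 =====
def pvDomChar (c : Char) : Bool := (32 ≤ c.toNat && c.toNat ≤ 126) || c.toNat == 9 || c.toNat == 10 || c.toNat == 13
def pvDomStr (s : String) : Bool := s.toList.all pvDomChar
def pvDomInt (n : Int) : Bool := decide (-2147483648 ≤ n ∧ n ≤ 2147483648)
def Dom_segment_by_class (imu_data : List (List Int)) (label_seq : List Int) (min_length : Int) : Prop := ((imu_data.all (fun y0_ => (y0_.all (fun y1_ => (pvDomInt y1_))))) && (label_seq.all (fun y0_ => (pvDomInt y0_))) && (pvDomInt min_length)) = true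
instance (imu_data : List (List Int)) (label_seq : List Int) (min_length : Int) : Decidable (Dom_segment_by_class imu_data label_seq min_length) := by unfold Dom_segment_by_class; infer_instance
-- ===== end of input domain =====

-- B replaces A's one-pass label-change state machine by a two-pass groups-then-filter decomposition
-- (collect run cut points, then slice and filter the runs); same cost, chosen as the more idiomatic shape.

-- ===== PORT A =====
-- A-side helper: the body of A's for-loop, state = (segments, current_label, start)
def pvStepA (imu_data : List (List Int)) (label_seq : List Int) (min_length : Int)
    (st : List (List (List Int) × Int) × Int × Int) (i : Int) :
    List (List (List Int) × Int) × Int × Int :=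
  if PySem.List.pyGetD label_seq i 0 ≠ st.2.1 then
    ((if i - st.2.2 ≥ min_length then
        st.1 ++ [(PySem.List.slice imu_data (some st.2.2) (some i), st.2.1)]
      else st.1),
     PySem.List.pyGetD label_seq i 0, i)
  else st

-- label_seq[0] raises IndexError on empty label_seq: Pre_ excludes it; the port defaults to 0 there
def segment_by_class (imu_data : List (List Int)) (label_seq : List Int) (min_length : Int) :
    List (List (List Int) × Int) :=
  let st := (PySem.List.pyRange 1 (label_seq.length : Int) 1).foldl
      (pvStepA imu_data label_seq min_length)
      ([], PySem.List.pyGetD label_seq 0 0, 0)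
  if (label_seq.length : Int) - st.2.2 ≥ min_length then
    st.1 ++ [(PySem.List.slice imu_data (some st.2.2) none, st.2.1)]
  else st.1

-- ===== PORT B =====
-- B-side helper: the body of B's emit loop; pair p = (start, stop?) with stop? = none for the final run
def pvEmitB (imu_data : List (List Int)) (label_seq : List Int) (min_length n : Int)
    (segs : List (List (List Int) × Int)) (p : Int × Option Int) :
    List (List (List Int) × Int) :=
  if (p.2.getD n) - p.1 ≥ min_length then
    segs ++ [(PySem.List.slice imu_data (some p.1) p.2, PySem.List.pyGetD label_seq p.1 0)]
  else segs

def segment_by_class_alt (imu_data : List (List Int)) (label_seq : List Int) (min_length : Int) :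
    List (List (List Int) × Int) :=
  let n : Int := label_seq.length
  let cuts := (PySem.List.pyRange 1 n 1).filter
      (fun i => PySem.List.pyGetD label_seq i 0 != PySem.List.pyGetD label_seq (i - 1) 0)
  (((0 :: cuts).zip (cuts.map some ++ [(none : Option Int)])).foldl
      (pvEmitB imu_data label_seq min_length n) [])

-- ===== PRECONDITION & SPEC =====
-- Pre_ excludes only the empty label_seq, on which A raises IndexError at label_seq[0].
def Pre_segment_by_class (imu_data : List (List Int)) (label_seq : List Int) (min_length : Int) : Prop :=
  label_seq ≠ []
instance (imu_data : List (List Int)) (label_seq : List Int) (min_length : Int) : Decidable (Pre_segment_by_class imu_data label_seq min_length) := by unfold Pre_segment_by_class; infer_instance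

def pvWitness_segment_by_class : List (List Int) × List Int × Int := ([[1], [2], [3]], [0, 0, 1], 1)

def Spec_segment_by_class (imu_data : List (List Int)) (label_seq : List Int) (min_length : Int) (out : List (List (List Int) × Int)) : Prop := out = segment_by_class_alt imu_data label_seq min_length
instance (imu_data : List (List Int)) (label_seq : List Int) (min_length : Int) (out : List (List (List Int) × Int)) : Decidable (Spec_segment_by_class imu_data label_seq min_length out) := by unfold Spec_segment_by_class; infer_instance

-- ===== CLAIM (what is proved, stated in full; the proofs are below) =====
def Claim_equal_segment_by_class : Prop := ∀ (imu_data : List (List Int)) (label_seq : List Int) (min_length : Int), Dom_segment_by_class imu_data label_seq min_length → Pre_segment_by_class imu_data label_seq min_length → Spec_segment_by_class imu_data label_seq min_length (segment_by_class imu_data label_seq min_length)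


-- ===== LEMMAS AND PROOFS =====

-- B's emit fold from start s over a remaining cut list
def pvEmitRuns (imu_data : List (List Int)) (label_seq : List Int) (min_length n : Int)
    (s : Int) (cuts : List Int) : List (List (List Int) × Int) :=
  (((s :: cuts).zip (cuts.map some ++ [(none : Option Int)])).foldl
      (pvEmitB imu_data label_seq min_length n) [])

-- A's epilogue (the "last segment" step)
def pvFinalA (imu_data : List (List Int)) (min_length n : Int)
    (st : List (List (List Int) × Int) × Int × Int) : List (List (List Int) × Int) :=
  if n - st.2.2 ≥ min_length then
    st.1 ++ [(PySem.List.slice imu_data (some st.2.2) none, st.2.1)]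
  else st.1

theorem pvEmitB_foldl_append (imu_data : List (List Int)) (label_seq : List Int) (min_length n : Int)
    (l : List (Int × Option Int)) (acc : List (List (List Int) × Int)) :
    l.foldl (pvEmitB imu_data label_seq min_length n) acc =
      acc ++ l.foldl (pvEmitB imu_data label_seq min_length n) [] := by
  induction l generalizing acc with
  | nil => simp
  | cons p l ih =>
    simp only [List.foldl_cons]
    rw [ih, ih (pvEmitB imu_data label_seq min_length n [] p)]
    unfold pvEmitB
    split <;> simp

theorem pvEmitRuns_nil (imu_data : List (List Int)) (label_seq : List Int) (min_length n s : Int) :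
    pvEmitRuns imu_data label_seq min_length n s [] =
      if n - s ≥ min_length then
        [(PySem.List.slice imu_data (some s) none, PySem.List.pyGetD label_seq s 0)]
      else [] := by
  unfold pvEmitRuns pvEmitB
  simp only [List.map_nil, List.nil_append, List.zip_cons_cons, List.zip_nil_right,
    List.foldl_cons, List.foldl_nil, Option.getD_none]

theorem pvEmitRuns_cons (imu_data : List (List Int)) (label_seq : List Int) (min_length n s j : Int)
    (rest : List Int) :
    pvEmitRuns imu_data label_seq min_length n s (j :: rest) =
      (if j - s ≥ min_length then
          [(PySem.List.slice imu_data (some s) (some j), PySem.List.pyGetD label_seq s 0)]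
        else [])
        ++ pvEmitRuns imu_data label_seq min_length n j rest := by
  unfold pvEmitRuns
  simp only [List.map_cons, List.cons_append, List.zip_cons_cons, List.foldl_cons]
  rw [pvEmitB_foldl_append]
  unfold pvEmitB
  split <;> simp_all

-- the main loop correspondence: A's remaining loop + epilogue from state (segs, label_seq[s], s)
-- equals segs ++ B's emit fold from start s over the remaining cut points
theorem pvMain (imu_data : List (List Int)) (label_seq : List Int) (min_length : Int) :
    ∀ (k : Nat) (j s : Int) (segs : List (List (List Int) × Int)),
      j = (label_seq.length : Int) - k → 1 ≤ j →
      PySem.List.pyGetD label_seq (j - 1) 0 = PySem.List.pyGetD label_seq s 0 →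
      pvFinalA imu_data min_length (label_seq.length : Int)
          ((PySem.List.pyRange j (label_seq.length : Int) 1).foldl
            (pvStepA imu_data label_seq min_length) (segs, PySem.List.pyGetD label_seq s 0, s)) =
        segs ++ pvEmitRuns imu_data label_seq min_length (label_seq.length : Int) s
          ((PySem.List.pyRange j (label_seq.length : Int) 1).filter
            (fun i => PySem.List.pyGetD label_seq i 0 != PySem.List.pyGetD label_seq (i - 1) 0)) := by
  intro k
  induction k with
  | zero =>
    intro j s segs hj h1 _
    rw [PySem.List.pyRange_one_eq_nil (by omega)]
    simp only [List.foldl_nil, List.filter_nil, pvEmitRuns_nil]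
    unfold pvFinalA
    split <;> simp
  | succ k ih =>
    intro j s segs hj h1 hcur
    by_cases hjn : (label_seq.length : Int) ≤ j
    · rw [PySem.List.pyRange_one_eq_nil hjn]
      simp only [List.foldl_nil, List.filter_nil, pvEmitRuns_nil]
      unfold pvFinalA
      split <;> simp
    · rw [Int.not_le] at hjn
      rw [PySem.List.pyRange_one_cons hjn]
      simp only [List.foldl_cons, List.filter_cons]
      by_cases hne : PySem.List.pyGetD label_seq j 0 = PySem.List.pyGetD label_seq s 0
      · -- same label: A's state is unchanged and B drops j from the cut list
        have hb : (PySem.List.pyGetD label_seq j 0 != PySem.List.pyGetD label_seq (j - 1) 0) = false := by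
          rw [bne_eq_false_iff_eq, hcur]
          exact hne
        rw [hb]
        simp only [Bool.false_eq_true, if_false]
        have hstep : pvStepA imu_data label_seq min_length
            (segs, PySem.List.pyGetD label_seq s 0, s) j
            = (segs, PySem.List.pyGetD label_seq s 0, s) := by
          unfold pvStepA
          simp [hne]
        rw [hstep]
        exact ih (j + 1) s segs (by omega) (by omega) (by simpa using hne)
      · -- label changes: A may emit the (s, j) run and restarts at j; B keeps j as a cut point
        have hb : (PySem.List.pyGetD label_seq j 0 != PySem.List.pyGetD label_seq (j - 1) 0) = true := by
          rw [bne_iff_ne, hcur]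
          exact hne
        rw [hb]
        simp only [if_true]
        have hstep : pvStepA imu_data label_seq min_length
            (segs, PySem.List.pyGetD label_seq s 0, s) j
            = ((if j - s ≥ min_length then
                  segs ++ [(PySem.List.slice imu_data (some s) (some j), PySem.List.pyGetD label_seq s 0)]
                else segs), PySem.List.pyGetD label_seq j 0, j) := by
          unfold pvStepA
          simp [hne]
        rw [hstep]
        rw [ih (j + 1) j
          (if j - s ≥ min_length then
              segs ++ [(PySem.List.slice imu_data (some s) (some j), PySem.List.pyGetD label_seq s 0)]
            else segs)
          (by omega) (by omega) (by simp)]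
        rw [pvEmitRuns_cons]
        split <;> simp

-- ===== VERDICT (by name: the statement is the Claim_ definition above) =====
theorem segment_by_class_spec : Claim_equal_segment_by_class := by
  intro imu_data label_seq min_length _ hpre
  unfold Spec_segment_by_class segment_by_class segment_by_class_alt
  have hlen0 : 0 < label_seq.length := List.length_pos_iff.mpr hpre
  have h := pvMain imu_data label_seq min_length (label_seq.length - 1) 1 0 []
    (by omega) (by omega) (by norm_num)
  unfold pvFinalA pvEmitRuns at h
  simpa using h
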